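-- pv_equiv track=rewrite | github.com/Jwata/DataStructures_Algorithms | geeksforgeeks/minimum-sum-two-numbers-formed-digits-array.py | min_sum_numbers
-- ===== SOURCE A (Python) =====
-- from heapq import heapify, heappop
--
-- def min_sum_numbers(arr):
--     n = len(arr)
--     heapify(arr) # O(n)
--
--     if n % 2 == 0:
--         a = n // 2
--         b = n // 2
--     else:
--         a = n // 2 + 1
--         b = n // 2
--
--     min_sum = 0
--     while len(arr) > 0:
--         d = heappop(arr) # O(log n)
--
--         if a >= b:
--             min_sum += d * (10 ** (a-1))
--             a -= 1
--         else:
--             min_sum += d * (10 ** (b-1))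
--             b -= 1
--
--     return min_sum
-- ===== SOURCE B (Python) =====
-- def min_sum_numbers(arr):
--     # Tally the values, then add each distinct value's whole block of
--     # positions at once using a closed-form sum of place weights:
--     # the digit of rank j (ascending) carries weight 10**((n-1-j)//2), and
--     # S(t) = sum(10**(k//2) for k in range(t)) has the closed form below.
--     tally = {}
--     for d in arr:
--         tally[d] = tally.get(d, 0) + 1
--
--     def S(t):
--         q, r = divmod(t, 2)
--         p = 10 ** q
--         return 2 * (p - 1) // 9 + r * p
--
--     n = len(arr)
--     total = 0
--     i = 0
--     for d in sorted(tally):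
--         c = tally[d]
--         total += d * (S(n - i) - S(n - i - c))
--         i += c
--     return total
-- ===== Notes on version B (the rewrite author's own statement) =====
-- stated objective: alternative
-- what changed: Replaces A's heapify/heappop loop (pop digits in ascending order, add d*10**place with two alternating place counters) by a dict tally of values plus one pass over the sorted distinct values, adding each value's whole block of positions at once via the closed-form geometric weight sum S(n-i)-S(n-i-c) with S(t)=sum(10**(k//2) for k in range(t)); B also does not mutate its argument (A heapifies and empties it).
import Mathlib
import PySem

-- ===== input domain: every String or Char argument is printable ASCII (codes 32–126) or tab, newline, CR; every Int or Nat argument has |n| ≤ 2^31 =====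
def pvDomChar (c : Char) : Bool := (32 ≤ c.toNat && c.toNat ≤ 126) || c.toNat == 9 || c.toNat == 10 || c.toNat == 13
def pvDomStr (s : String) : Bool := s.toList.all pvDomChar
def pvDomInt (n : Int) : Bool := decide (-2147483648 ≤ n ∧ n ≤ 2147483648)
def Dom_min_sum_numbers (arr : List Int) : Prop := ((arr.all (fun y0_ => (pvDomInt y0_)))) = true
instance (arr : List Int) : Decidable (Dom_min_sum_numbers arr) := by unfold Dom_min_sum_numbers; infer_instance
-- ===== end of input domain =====

-- B replaces A's heapify/heappop loop (pop ascending, add d*10**place with two place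
-- counters) by a dict tally plus, per distinct value, a closed-form geometric block
-- weight S(n-i)-S(n-i-c); equivalence is about the RETURN value only: A mutates
-- (heapifies and empties) its argument, B does not.

-- ===== PORT A =====
-- heapify + repeated heappop consumes arr in ascending order; modelled by sorting once
-- and recursing down the sorted list (the while-loop, branches and accumulator as in A).
-- 10 ** (a-1): whenever the branch fires the exponent is ≥ 0, so `.toNat` is exact there.
def pvLoopA : List Int → Int → Int → Int → Int
  | [], _, _, min_sum => min_sum
  | d :: t, a, b, min_sum =>
      if a ≥ b then pvLoopA t (a - 1) b (min_sum + d * 10 ^ (a - 1).toNat)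
      else pvLoopA t a (b - 1) (min_sum + d * 10 ^ (b - 1).toNat)

def min_sum_numbers (arr : List Int) : Int :=
  let n : Int := arr.length
  let s : List Int := PySem.List.sorted arr (fun x => x) false
  let ab : Int × Int :=
    if PySem.Int.mod n 2 = 0 then (PySem.Int.floordiv n 2, PySem.Int.floordiv n 2)
    else (PySem.Int.floordiv n 2 + 1, PySem.Int.floordiv n 2)
  pvLoopA s ab.1 ab.2 0

-- ===== PORT B =====
-- S(t) = sum of 10**(k//2) for k < t, in closed form; every call passes t ≥ 0,
-- so q = t//2 ≥ 0 and `.toNat` on the exponent is exact there.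
def pvS (t : Int) : Int :=
  let q := PySem.Int.floordiv t 2
  let r := PySem.Int.mod t 2
  let p : Int := 10 ^ q.toNat
  PySem.Int.floordiv (2 * (p - 1)) 9 + r * p

def min_sum_numbers_alt (arr : List Int) : Int :=
  let tally := arr.foldl (fun t d => t.insert d (t.getD d 0 + 1))
    (PySem.Dict.empty : PySem.Dict Int Int)
  let n : Int := arr.length
  let res := (PySem.List.sorted tally.keys (fun x => x) false).foldl
      (fun st d =>
        -- c = tally[d]; d comes from tally's keys, so the lookup never raises
        let c := tally.getD d 0
        (st.1 + d * (pvS (n - st.2) - pvS (n - st.2 - c)), st.2 + c))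
      ((0 : Int), (0 : Int))
  res.1

-- ===== PRECONDITION & SPEC =====
def Spec_min_sum_numbers (arr : List Int) (out : Int) : Prop := out = min_sum_numbers_alt arr
instance (arr : List Int) (out : Int) : Decidable (Spec_min_sum_numbers arr out) := by unfold Spec_min_sum_numbers; infer_instance

-- ===== CLAIM (what is proved, stated in full; the proofs are below) =====
def Claim_equal_min_sum_numbers : Prop := ∀ (arr : List Int), Dom_min_sum_numbers arr → Spec_min_sum_numbers arr (min_sum_numbers arr)

-- ===== LEMMAS AND PROOFS =====

-- the place-weight sum both ports are reduced to: element of rank j from the left in a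
-- list of length L carries weight 10^((L-1-j)/2)
def pvWsum : List Int → Int
  | [] => 0
  | d :: t => d * 10 ^ (t.length / 2) + pvWsum t

-- S(t) as a recursive sum
def pvSN : Nat → Int
  | 0 => 0
  | t + 1 => pvSN t + 10 ^ (t / 2)

-- the multiset expansion of a tally f over a value list ds
def pvE (f : Int → Nat) (ds : List Int) : List Int :=
  ds.flatMap (fun d => List.replicate (f d) d)

theorem pvLoopA_acc (l : List Int) : ∀ (a b acc : Int),
    pvLoopA l a b acc = acc + pvLoopA l a b 0 := by
  induction l with
  | nil => intro a b acc; simp [pvLoopA]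
  | cons d t ih =>
    intro a b acc
    by_cases h : a ≥ b
    · simp only [pvLoopA, if_pos h]
      rw [ih (a - 1) b (acc + d * 10 ^ (a - 1).toNat),
          ih (a - 1) b (0 + d * 10 ^ (a - 1).toNat)]
      ring
    · simp only [pvLoopA, if_neg h]
      rw [ih a (b - 1) (acc + d * 10 ^ (b - 1).toNat),
          ih a (b - 1) (0 + d * 10 ^ (b - 1).toNat)]
      ring

theorem pvLoopA_comm (l : List Int) : ∀ (a b acc : Int),
    pvLoopA l a b acc = pvLoopA l b a acc := by
  induction l with
  | nil => intro a b acc; simp [pvLoopA]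
  | cons d t ih =>
    intro a b acc
    rcases lt_trichotomy a b with h | h | h
    · simp only [pvLoopA, if_neg (not_le.mpr h), if_pos (le_of_lt h)]
      exact ih a (b - 1) _
    · subst h; rfl
    · simp only [pvLoopA, if_pos (le_of_lt h), if_neg (not_le.mpr h)]
      exact ih (a - 1) b _

theorem pvLoopA_wsum (l : List Int) :
    pvLoopA l (((l.length + 1) / 2 : Nat) : Int) ((l.length / 2 : Nat) : Int) 0
      = pvWsum l := by
  induction l with
  | nil => simp [pvLoopA, pvWsum]
  | cons d t ih =>
    have h2 : ((d :: t).length + 1) / 2 = t.length / 2 + 1 := by simp; omega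
    have h3 : (d :: t).length / 2 = (t.length + 1) / 2 := by simp
    rw [h2, h3]
    have hge : (((t.length / 2 + 1 : Nat) : Int)) ≥ (((t.length + 1) / 2 : Nat) : Int) := by
      have : (t.length + 1) / 2 ≤ t.length / 2 + 1 := by omega
      exact_mod_cast this
    have hsub : ((((t.length / 2 + 1 : Nat) : Int)) - 1) = ((t.length / 2 : Nat) : Int) := by
      push_cast; ring
    simp only [pvLoopA, if_pos hge, hsub, Int.toNat_natCast]
    rw [pvLoopA_acc, pvLoopA_comm, ih, pvWsum]
    ring

-- A's port computes the place-weight sum of the sorted digits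
theorem pvA_eq_wsum (arr : List Int) :
    min_sum_numbers arr = pvWsum (PySem.List.sorted arr (fun x => x) false) := by
  simp only [min_sum_numbers]
  set s := PySem.List.sorted arr (fun x => x) false with hs
  have hlen : s.length = arr.length := PySem.List.length_sorted ..
  rw [← pvLoopA_wsum s, hlen]
  have hmod : PySem.Int.mod ((arr.length : Nat) : Int) 2 = ((arr.length % 2 : Nat) : Int) :=
    PySem.Int.mod_natCast _ _
  have hdiv : PySem.Int.floordiv ((arr.length : Nat) : Int) 2 = ((arr.length / 2 : Nat) : Int) :=
    PySem.Int.floordiv_natCast _ _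
  by_cases hpar : arr.length % 2 = 0
  · have hcond : PySem.Int.mod ((arr.length : Nat) : Int) 2 = 0 := by
      rw [hmod, hpar]; rfl
    rw [if_pos hcond, hdiv,
        show (arr.length + 1) / 2 = arr.length / 2 from by omega]
  · have hcond : ¬ PySem.Int.mod ((arr.length : Nat) : Int) 2 = 0 := by
      rw [hmod]; intro hc; exact hpar (by exact_mod_cast hc)
    rw [if_neg hcond, hdiv,
        show (arr.length + 1) / 2 = arr.length / 2 + 1 from by omega]
    push_cast
    rfl

-- ----- the closed form pvS agrees with the recursive sum pvSN -----
theorem pv_nine_dvd (q : Nat) : ∃ e : Int, (10 : Int) ^ q - 1 = 9 * e := by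
  induction q with
  | zero => exact ⟨0, by ring⟩
  | succ m ih =>
    obtain ⟨e, he⟩ := ih
    exact ⟨10 * e + 1, by rw [pow_succ]; linarith⟩

theorem pvS_nat (t : Nat) (e : Int) (he : (10 : Int) ^ (t / 2) - 1 = 9 * e) :
    pvS ((t : Nat) : Int) = 2 * e + ((t % 2 : Nat) : Int) * 10 ^ (t / 2) := by
  simp only [pvS]
  have hq : PySem.Int.floordiv ((t : Nat) : Int) 2 = ((t / 2 : Nat) : Int) := by
    exact_mod_cast PySem.Int.floordiv_natCast t 2
  have hr : PySem.Int.mod ((t : Nat) : Int) 2 = ((t % 2 : Nat) : Int) := by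
    exact_mod_cast PySem.Int.mod_natCast t 2
  rw [hq, hr, Int.toNat_natCast, he,
      show (2 : Int) * (9 * e) = (2 * e) * 9 from by ring,
      PySem.Int.floordiv_eq_ediv_of_pos (by norm_num : (0 : Int) < 9),
      Int.mul_ediv_cancel _ (by norm_num : (9 : Int) ≠ 0)]

theorem pvS_eq_SN (t : Nat) : pvS ((t : Nat) : Int) = pvSN t := by
  induction t with
  | zero => decide
  | succ m ih =>
    obtain ⟨e, he⟩ := pv_nine_dvd ((m + 1) / 2)
    obtain ⟨e', he'⟩ := pv_nine_dvd (m / 2)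
    rw [pvS_nat (m + 1) e he, pvSN, ← ih, pvS_nat m e' he']
    rcases Nat.mod_two_eq_zero_or_one m with hm | hm
    · have h1 : (m + 1) / 2 = m / 2 := by omega
      have h2 : (m + 1) % 2 = 1 := by omega
      rw [h1] at he
      have hee : e = e' := by linarith
      rw [h1, h2, hm, hee]
      push_cast; ring
    · have h1 : (m + 1) / 2 = m / 2 + 1 := by omega
      have h2 : (m + 1) % 2 = 0 := by omega
      rw [h1] at he
      have hp : (10 : Int) ^ (m / 2 + 1) = 10 * 10 ^ (m / 2) := by ring
      rw [hp] at he
      have hee : e = e' + 10 ^ (m / 2) := by linarith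
      rw [h1, h2, hm, hee, hp]
      push_cast; ring

-- ----- place-weight sum of one block of equal values -----
theorem pvWsum_block (d : Int) (r : List Int) : ∀ (c : Nat),
    pvWsum (List.replicate c d ++ r)
      = d * (pvSN (c + r.length) - pvSN r.length) + pvWsum r := by
  intro c
  induction c with
  | zero => simp
  | succ k ih =>
    have hcons : List.replicate (k + 1) d ++ r = d :: (List.replicate k d ++ r) := by
      simp [List.replicate_succ]
    rw [hcons, pvWsum, ih,
        show (k + 1) + r.length = (k + r.length) + 1 from by omega, pvSN]
    simp
    ring

-- ----- B's fold over the distinct values, a block at a time -----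
theorem pvFold_blocks (f : Int → Nat) (n : Nat) :
    ∀ (ks : List Int) (total : Int), (pvE f ks).length ≤ n →
      (ks.foldl
          (fun st d =>
            (st.1 + d * (pvS ((n : Nat) - st.2) - pvS ((n : Nat) - st.2 - ((f d : Nat) : Int))),
             st.2 + ((f d : Nat) : Int)))
          (total, ((n : Nat) : Int) - (((pvE f ks).length : Nat) : Int))).1
        = total + pvWsum (pvE f ks) := by
  intro ks
  induction ks with
  | nil => intro total _; simp [pvE, pvWsum]
  | cons d t ih =>
    intro total hle
    have hE : pvE f (d :: t) = List.replicate (f d) d ++ pvE f t := by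
      simp [pvE, List.flatMap_cons]
    have hlen : (pvE f (d :: t)).length = f d + (pvE f t).length := by
      rw [hE]; simp
    rw [hlen] at hle ⊢
    set m' : Nat := (pvE f t).length with hm'
    rw [List.foldl_cons]
    have harg1 : ((n : Nat) : Int) - (((n : Nat) : Int) - ((f d + m' : Nat) : Int))
        = (((f d + m' : Nat) : Nat) : Int) := by push_cast; ring
    have harg2 : (((f d + m' : Nat) : Nat) : Int) - ((f d : Nat) : Int)
        = ((m' : Nat) : Int) := by push_cast; ring
    have hst2 : (((n : Nat) : Int) - ((f d + m' : Nat) : Int)) + ((f d : Nat) : Int)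
        = ((n : Nat) : Int) - ((m' : Nat) : Int) := by push_cast; ring
    simp only [harg1, harg2, hst2]
    rw [ih _ (by omega)]
    rw [hE, pvWsum_block, ← hm', pvS_eq_SN, pvS_eq_SN]
    ring

-- ----- the expansion of the sorted distinct values is sorted(arr) -----
theorem pvE_count (f : Int → Nat) (x : Int) : ∀ (ds : List Int), ds.Nodup →
    (pvE f ds).count x = if x ∈ ds then f x else 0 := by
  intro ds
  induction ds with
  | nil => intro _; simp [pvE]
  | cons d t ih =>
    intro hnd
    have hnd' := (List.nodup_cons.mp hnd)
    rw [pvE, List.flatMap_cons, List.count_append, ← pvE, ih hnd'.2, List.count_replicate]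
    by_cases hx : x = d
    · subst hx
      simp [hnd'.1]
    · simp [hx, Ne.symm hx]

theorem pvE_mem {f : Int → Nat} {ds : List Int} {x : Int} (h : x ∈ pvE f ds) : x ∈ ds := by
  rcases List.mem_flatMap.mp h with ⟨d, hd, hx⟩
  rw [List.eq_of_mem_replicate hx]
  exact hd

theorem pvE_pairwise (f : Int → Nat) : ∀ (ds : List Int), ds.Pairwise (· < ·) →
    (pvE f ds).Pairwise (· ≤ ·) := by
  intro ds
  induction ds with
  | nil => intro _; simp [pvE]
  | cons d t ih =>
    intro hp
    rcases List.pairwise_cons.mp hp with ⟨hhead, htail⟩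
    rw [pvE, List.flatMap_cons, ← pvE]
    apply List.pairwise_append.mpr
    refine ⟨List.pairwise_replicate.mpr (Or.inr (le_refl d)), ih htail, ?_⟩
    intro a ha b hb
    rw [List.eq_of_mem_replicate ha]
    exact le_of_lt (hhead b (pvE_mem hb))

theorem pvE_perm (arr ds : List Int) (hnd : ds.Nodup)
    (hmem : ∀ x, x ∈ ds ↔ x ∈ arr) :
    (pvE (fun d => arr.count d) ds).Perm arr := by
  apply List.perm_iff_count.mpr
  intro x
  rw [pvE_count _ _ _ hnd]
  by_cases hx : x ∈ ds
  · simp [hx]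
  · have : x ∉ arr := fun hmem' => hx ((hmem x).mpr hmem')
    simp [hx, List.count_eq_zero.mpr this]

theorem pvE_eq_sorted (arr ds : List Int) (hnd : ds.Nodup) (hlt : ds.Pairwise (· < ·))
    (hmem : ∀ x, x ∈ ds ↔ x ∈ arr) :
    PySem.List.sorted arr (fun x => x) false = pvE (fun d => arr.count d) ds := by
  exact PySem.List.sorted_id_eq_of_perm_of_pairwise arr _ (pvE_perm arr ds hnd hmem)
    (pvE_pairwise _ _ hlt)

-- ===== VERDICT (by name: the statement is the Claim_ definition above) =====
theorem min_sum_numbers_spec : Claim_equal_min_sum_numbers := by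
  intro arr _
  unfold Spec_min_sum_numbers
  rw [pvA_eq_wsum]
  simp only [min_sum_numbers_alt, PySem.Dict.foldl_insert_getD_add_one_eq_counter,
             PySem.Dict.getD_counter]
  set kl := PySem.List.sorted (PySem.Dict.counter arr).keys (fun x => x) false with hkl
  have hklnd : kl.Nodup :=
    ((PySem.List.sorted_perm ..).nodup_iff).mpr (PySem.Dict.nodup_keys_counter arr)
  have hklle : kl.Pairwise (fun a b => a ≤ b) := PySem.List.sorted_pairwise ..
  have hkllt : kl.Pairwise (· < ·) :=
    (hklle.and hklnd).imp (fun h => lt_of_le_of_ne h.1 h.2)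
  have hklmem : ∀ x, x ∈ kl ↔ x ∈ arr := by
    intro x
    rw [hkl, PySem.List.mem_sorted, PySem.Dict.keys_counter, PySem.Set.mem_ofList]
  have hperm := pvE_perm arr kl hklnd hklmem
  have hlen : (pvE (fun d => arr.count d) kl).length = arr.length := hperm.length_eq
  have hinit : ((0 : Int), (0 : Int))
      = ((0 : Int), ((arr.length : Nat) : Int)
          - (((pvE (fun d => arr.count d) kl).length : Nat) : Int)) := by
    rw [hlen]; simp
  rw [hinit, pvFold_blocks (fun d => arr.count d) arr.length kl 0 (by omega),
      ← pvE_eq_sorted arr kl hklnd hkllt hklmem]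
  ring
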